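-- pv_equiv track=rewrite | github.com/sarkisc/codefights | WizelineBot/sourceCode.py | chatBot
-- ===== SOURCE A (Python) =====
-- def chatBot(conversations, currentConversation):
--     # get matchInfo: (numMatches, largestMatchIndex) for each conversation, store them in a list
--         # if numMatches == 0 for all, return currentConversation
--     # compare conversations, starting from first one, and see which has greatest
--
--     matchInfo = []
--     currentConvoSet = set(currentConversation)
--
--     for convo in conversations:
--         numMatches = 0
--         largestMatchIndex = -1
--         matchedWords = set()
--         for i in range(len(convo)):
--             if convo[i] in currentConvoSet:
--                 if convo[i] not in matchedWords:
--                     matchedWords.add(convo[i])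
--                     numMatches += 1
--                 largestMatchIndex = i
--         matchInfo.append([numMatches, largestMatchIndex])
--
--     mostMatches = -1
--     index = -1
--     for i in range(len(matchInfo)):
--         if matchInfo[i][0] > mostMatches:
--             mostMatches = matchInfo[i][0]
--             index = i
--
--     if mostMatches == 0:
--         return currentConversation
--     else:
--         # should check if len(conversations[index]) > matchInfo[index][1]+1 for safety
--         return currentConversation + conversations[index][(matchInfo[index][1]+1):]
-- ===== SOURCE B (Python) =====
-- def chatBot(conversations, currentConversation):
--     # Inverted index: word -> {conversation index: last position of that word there}.
--     # Scores are then accumulated word-by-word over the query's distinct words via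
--     # index lookups; no conversation is rescanned and no per-conversation match set
--     # is maintained.
--     occ = {}
--     for ci, convo in enumerate(conversations):
--         for pos, w in enumerate(convo):
--             occ.setdefault(w, {})[ci] = pos
--     counts = {}
--     last = {}
--     for w in set(currentConversation):
--         for ci, pos in occ.get(w, {}).items():
--             counts[ci] = counts.get(ci, 0) + 1
--             if pos > last.get(ci, -1):
--                 last[ci] = pos
--     best = 0
--     for i in range(1, len(conversations)):
--         if counts.get(i, 0) > counts.get(best, 0):
--             best = i
--     if counts.get(best, 0) == 0:
--         return currentConversation
--     return currentConversation + conversations[best][last[best] + 1:]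
-- ===== Notes on version B (the rewrite author's own statement) =====
-- stated objective: alternative
-- what changed: B builds an inverted index (word -> {conversation index: last position}) in one pass and accumulates each conversation's distinct-match count and last match position word-by-word over the query's distinct words via index lookups, instead of A's per-conversation rescans with a matchedWords set and a matchInfo table.
import Mathlib
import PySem

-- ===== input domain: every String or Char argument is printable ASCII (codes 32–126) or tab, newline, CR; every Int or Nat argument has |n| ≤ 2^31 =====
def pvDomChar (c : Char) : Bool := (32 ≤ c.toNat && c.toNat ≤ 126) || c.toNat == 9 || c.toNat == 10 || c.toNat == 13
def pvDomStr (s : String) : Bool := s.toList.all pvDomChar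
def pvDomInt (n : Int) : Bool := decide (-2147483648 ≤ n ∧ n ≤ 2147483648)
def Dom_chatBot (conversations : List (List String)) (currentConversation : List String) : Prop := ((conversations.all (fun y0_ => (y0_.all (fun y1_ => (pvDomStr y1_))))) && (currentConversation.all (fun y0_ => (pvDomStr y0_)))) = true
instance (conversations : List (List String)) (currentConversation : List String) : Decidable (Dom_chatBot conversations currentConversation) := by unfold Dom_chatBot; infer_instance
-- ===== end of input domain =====

-- B replaces A's per-conversation scanning entirely: it builds an inverted index
-- (word -> {conversation index -> last position}) in one pass and then accumulates the
-- scores word-by-word over the query's distinct words by index lookups; A's inner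
-- matched-word set and per-conversation (numMatches, largestMatchIndex) loop disappear.
-- Alternative decomposition, same asymptotic cost.


-- ===== PORT A =====
-- A's inner loop over `range(len(convo))` (= enumerate), state (numMatches, largestMatchIndex, matchedWords)
def chatBotInner (cur : PySem.Set String) (convo : List String) : Int × Int × PySem.Set String :=
  (PySem.List.enumerate convo).foldl
    (fun s p =>
      if PySem.Set.contains cur p.2 then
        if PySem.Set.contains s.2.2 p.2 then (s.1, p.1, s.2.2)
        else (s.1 + 1, p.1, PySem.Set.add s.2.2 p.2)
      else s)
    (0, -1, PySem.Set.empty)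

-- A's second loop: first index with strictly greater numMatches, state (mostMatches, index)
def chatBotSelectA (matchInfo : List (Int × Int)) : Int × Int :=
  (PySem.List.enumerate matchInfo).foldl
    (fun s p => if p.2.1 > s.1 then (p.2.1, p.1) else s) (-1, -1)

def chatBot (conversations : List (List String)) (currentConversation : List String) : List String :=
  let cur := PySem.Set.ofList currentConversation
  let matchInfo := conversations.foldl
    (fun acc convo => acc ++ [((chatBotInner cur convo).1, (chatBotInner cur convo).2.1)])
    ([] : List (Int × Int))
  let sel := chatBotSelectA matchInfo
  if sel.1 = 0 then currentConversation
  else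
    -- pyGet? is none exactly where Python raises IndexError (conversations = [], excluded by Pre_);
    -- the .getD defaults are never reached inside Pre_
    currentConversation ++
      PySem.List.slice ((PySem.List.pyGet? conversations sel.2).getD [])
        (some (((PySem.List.pyGet? matchInfo sel.2).getD (0, -1)).2 + 1))

-- ===== PORT B =====
-- B's inverted index: occ = word -> {conversation index -> last position of the word there}
-- (`occ.setdefault(w, {})[ci] = pos` = overwrite-in-place at w with the inner dict updated at ci)
def bOcc (conversations : List (List String)) : PySem.Dict String (PySem.Dict Int Int) :=
  (PySem.List.enumerate conversations).foldl
    (fun occ p => (PySem.List.enumerate p.2).foldl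
      (fun o q => o.insert q.2 ((o.getD q.2 PySem.Dict.empty).insert p.1 q.1)) occ)
    PySem.Dict.empty

-- one step of B's accumulation loop body: counts[ci] = counts.get(ci, 0) + 1
def bStepCounts (c : PySem.Dict Int Int) (q : Int × Int) : PySem.Dict Int Int :=
  c.insert q.1 (c.getD q.1 0 + 1)

-- ... and: if pos > last.get(ci, -1): last[ci] = pos
def bStepLast (d : PySem.Dict Int Int) (q : Int × Int) : PySem.Dict Int Int :=
  if q.2 > d.getD q.1 (-1) then d.insert q.1 q.2 else d

-- B's word-major accumulation: for w in set(currentConversation): for ci, pos in occ.get(w, {}).items()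
def bTallies (occ : PySem.Dict String (PySem.Dict Int Int)) (cur : PySem.Set String) :
    PySem.Dict Int Int × PySem.Dict Int Int :=
  List.foldl
    (fun cl w => List.foldl (fun s q => (bStepCounts s.1 q, bStepLast s.2 q)) cl
      (occ.getD w PySem.Dict.empty).items)
    (PySem.Dict.empty, PySem.Dict.empty) cur

def chatBot_alt (conversations : List (List String)) (currentConversation : List String) : List String :=
  let cl := bTallies (bOcc conversations) (PySem.Set.ofList currentConversation)
  let best := (PySem.List.pyRange 1 (conversations.length : Int) 1).foldl
    (fun b i => if cl.1.getD i 0 > cl.1.getD b 0 then i else b) 0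
  if cl.1.getD best 0 = 0 then currentConversation
  else
    -- Python's `last[best]` / `conversations[best]`: the key/index is present whenever this
    -- branch is reached (counts.get(best, 0) > 0), so the .getD defaults are never used
    currentConversation ++
      PySem.List.slice ((PySem.List.pyGet? conversations best).getD [])
        (some (cl.2.getD best (-1) + 1))

-- ===== PRECONDITION & SPEC =====
-- On conversations = [] the Python A raises IndexError (it indexes conversations[-1]); excluded.
def Pre_chatBot (conversations : List (List String)) (currentConversation : List String) : Prop :=
  conversations ≠ []
instance (conversations : List (List String)) (currentConversation : List String) : Decidable (Pre_chatBot conversations currentConversation) := by unfold Pre_chatBot; infer_instance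

def pvWitness_chatBot : List (List String) × List String := ([["hello", "world"], ["bye"]], ["world", "now"])

def Spec_chatBot (conversations : List (List String)) (currentConversation : List String) (out : List String) : Prop := out = chatBot_alt conversations currentConversation
instance (conversations : List (List String)) (currentConversation : List String) (out : List String) : Decidable (Spec_chatBot conversations currentConversation out) := by unfold Spec_chatBot; infer_instance

-- ===== CLAIM (what is proved, stated in full; the proofs are below) =====
def Claim_equal_chatBot : Prop := ∀ (conversations : List (List String)) (currentConversation : List String), Dom_chatBot conversations currentConversation → Pre_chatBot conversations currentConversation → Spec_chatBot conversations currentConversation (chatBot conversations currentConversation)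

-- ===== LEMMAS AND PROOFS =====

-- proof-side characterisations --------------------------------------------------------------

-- the last position of w in c (none iff w ∉ c)
def lastPosP (w : String) (c : List String) : Option Int :=
  (PySem.List.enumerate c).foldl (fun a q => if q.2 = w then some q.1 else a) none

-- what B's inverted index stores at (w, ci)
def occSpecP (convs : List (List String)) (w : String) (ci : Int) : Option Int :=
  if 0 ≤ ci then (convs[ci.toNat]?).bind (fun c => lastPosP w c) else none

-- running maximum over the positions a lookup function yields
def foldMatchP (g : String → Option Int) (ws : List String) (m : Int) : Int :=
  ws.foldl (fun m w => match g w with | some v => max m v | none => m) m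

-- B's inner indexing loop for the single conversation convo at index ci
def occLoopP (occ : PySem.Dict String (PySem.Dict Int Int)) (ci : Int) (convo : List String) :
    PySem.Dict String (PySem.Dict Int Int) :=
  (PySem.List.enumerate convo).foldl
    (fun o q => o.insert q.2 ((o.getD q.2 PySem.Dict.empty).insert ci q.1)) occ

-- lastPosP ---------------------------------------------------------------------------------

theorem lastPosP_append (w x : String) (c : List String) :
    lastPosP w (c ++ [x]) = if x = w then some (c.length : Int) else lastPosP w c := by
  unfold lastPosP
  rw [PySem.List.enumerate_append, List.foldl_append]
  simp [PySem.List.enumerate_cons, PySem.List.enumerate_nil]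

theorem lastPosP_bounds (w : String) (c : List String) (v : Int) :
    lastPosP w c = some v → 0 ≤ v ∧ v < (c.length : Int) := by
  induction c using List.reverseRecOn with
  | nil => intro h; simp [lastPosP, PySem.List.enumerate_nil] at h
  | append_singleton c x ih =>
    rw [lastPosP_append]
    split_ifs with hx
    · intro h
      obtain rfl : (c.length : Int) = v := by simpa using h
      simp only [List.length_append, List.length_cons, List.length_nil]
      constructor
      · positivity
      · push_cast; omega
    · intro h
      obtain ⟨h1, h2⟩ := ih h
      simp only [List.length_append, List.length_cons, List.length_nil]
      constructor
      · exact h1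
      · push_cast; omega

theorem lastPosP_isSome_iff (w : String) (c : List String) :
    (lastPosP w c).isSome = true ↔ w ∈ c := by
  induction c using List.reverseRecOn with
  | nil => simp [lastPosP, PySem.List.enumerate_nil]
  | append_singleton c x ih =>
    rw [lastPosP_append]
    split_ifs with hx
    · subst hx; simp
    · rw [ih]
      simp only [List.mem_append, List.mem_singleton]
      constructor
      · exact Or.inl
      · rintro (h | rfl)
        · exact h
        · exact absurd rfl hx

-- foldMatchP -------------------------------------------------------------------------------

theorem foldMatchP_none (ws : List String) (m : Int) : foldMatchP (fun _ => none) ws m = m := by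
  induction ws generalizing m with
  | nil => rfl
  | cons w ws ih => simpa [foldMatchP] using ih m

theorem foldMatchP_congr (g g' : String → Option Int) : ∀ (ws : List String) (m : Int),
    (∀ w ∈ ws, g w = g' w) → foldMatchP g ws m = foldMatchP g' ws m := by
  intro ws
  induction ws with
  | nil => intro m _; rfl
  | cons w ws ih =>
    intro m h
    simp only [foldMatchP, List.foldl_cons]
    rw [h w List.mem_cons_self]
    exact ih _ (fun w' hw' => h w' (List.mem_cons_of_mem _ hw'))

theorem le_foldMatchP_init (g : String → Option Int) : ∀ (ws : List String) (m : Int),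
    m ≤ foldMatchP g ws m := by
  intro ws
  induction ws with
  | nil => intro m; exact le_refl m
  | cons w ws ih =>
    intro m
    simp only [foldMatchP, List.foldl_cons]
    cases hg : g w with
    | none => exact ih m
    | some v => exact le_trans (le_max_left m v) (ih _)

theorem foldMatchP_le (g : String → Option Int) (b : Int) : ∀ (ws : List String) (m : Int),
    m ≤ b → (∀ w ∈ ws, ∀ v, g w = some v → v ≤ b) → foldMatchP g ws m ≤ b := by
  intro ws
  induction ws with
  | nil => intro m hm _; exact hm
  | cons w ws ih =>
    intro m hm h
    simp only [foldMatchP, List.foldl_cons]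
    cases hg : g w with
    | none => exact ih m hm (fun w' hw' => h w' (List.mem_cons_of_mem _ hw'))
    | some v =>
      exact ih _ (max_le hm (h w List.mem_cons_self v hg))
        (fun w' hw' => h w' (List.mem_cons_of_mem _ hw'))

theorem le_foldMatchP_of_mem (g : String → Option Int) (v : Int) (w : String)
    (hg : g w = some v) : ∀ (ws : List String) (m : Int), w ∈ ws → v ≤ foldMatchP g ws m := by
  intro ws
  induction ws with
  | nil => intro m hw; simp at hw
  | cons a ws ih =>
    intro m hw
    simp only [foldMatchP, List.foldl_cons]
    rcases List.mem_cons.1 hw with rfl | hmem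
    · rw [hg]
      exact le_trans (le_max_right m v) (le_foldMatchP_init g ws _)
    · cases g a with
      | none => exact ih m hmem
      | some u => exact ih _ hmem

-- A's inner loop characterised -------------------------------------------------------------

theorem chatBotInner_append (cur : PySem.Set String) (convo : List String) (w : String) :
    chatBotInner cur (convo ++ [w]) =
      (if PySem.Set.contains cur w then
        if PySem.Set.contains (chatBotInner cur convo).2.2 w then
          ((chatBotInner cur convo).1, (convo.length : Int), (chatBotInner cur convo).2.2)
        else ((chatBotInner cur convo).1 + 1, (convo.length : Int),
              PySem.Set.add (chatBotInner cur convo).2.2 w)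
      else chatBotInner cur convo) := by
  unfold chatBotInner
  rw [PySem.List.enumerate_append, List.foldl_append]
  simp only [PySem.List.enumerate_cons, PySem.List.enumerate_nil, List.foldl_cons, List.foldl_nil,
    zero_add]

theorem countP_append_singleton (l : List String) (hnd : l.Nodup) (c : List String) (x : String) :
    (List.countP (fun w => decide (w ∈ c ++ [x])) l : Int)
      = (List.countP (fun w => decide (w ∈ c)) l : Int)
        + (if x ∈ l ∧ x ∉ c then 1 else 0) := by
  have key : List.countP (fun w => decide (w ∈ c ++ [x])) l
      = List.countP (fun w => decide (w ∈ c)) l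
        + List.countP (fun w => decide (w = x) && decide (x ∉ c)) l := by
    clear hnd
    induction l with
    | nil => rfl
    | cons a l ih =>
      simp only [List.countP_cons]
      rw [ih]
      by_cases h2 : a = x
      · subst h2
        by_cases h1 : a ∈ c <;> simp [h1] <;> omega
      · by_cases h1 : a ∈ c <;> simp [h1, h2] <;> omega
  have key2 : List.countP (fun w => decide (w = x) && decide (x ∉ c)) l
      = if x ∈ l ∧ x ∉ c then 1 else 0 := by
    by_cases hc : x ∈ c
    · have hfn : (fun w => decide (w = x) && decide (x ∉ c)) = fun _ => false := by
        funext w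
        simp [hc]
      rw [hfn, List.countP_false, if_neg (fun h => h.2 hc)]
      rfl
    · have hfn : (fun w => decide (w = x) && decide (x ∉ c)) = fun w => w == x := by
        funext w
        by_cases h : w = x <;> simp [h, hc]
      rw [hfn]
      have hcnt : List.countP (fun w => w == x) l = List.count x l := rfl
      rw [hcnt]
      by_cases hx : x ∈ l
      · rw [List.count_eq_one_of_mem hnd hx, if_pos ⟨hx, hc⟩]
      · rw [List.count_eq_zero_of_not_mem hx, if_neg (fun h => hx h.1)]
  rw [key, key2]
  push_cast
  split_ifs <;> omega

theorem chatBotInner_char (cur : PySem.Set String) (hnd : List.Nodup cur) (c : List String) :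
    (chatBotInner cur c).1 = (List.countP (fun w => decide (w ∈ c)) cur : Int)
  ∧ (chatBotInner cur c).2.1 = foldMatchP (fun w => lastPosP w c) cur (-1)
  ∧ (∀ x, PySem.Set.contains (chatBotInner cur c).2.2 x = true
        ↔ (x ∈ c ∧ PySem.Set.contains cur x = true)) := by
  induction c using List.reverseRecOn with
  | nil =>
    refine ⟨by simp [chatBotInner, PySem.List.enumerate_nil], ?_, ?_⟩
    · have : (fun w => lastPosP w ([] : List String)) = (fun _ => (none : Option Int)) := by
        funext w; rfl
      rw [this, foldMatchP_none]
      rfl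
    · intro x
      simp [chatBotInner, PySem.List.enumerate_nil, PySem.Set.empty, PySem.Set.contains]
  | append_singleton c x ih =>
    obtain ⟨ih1, ih2, ih3⟩ := ih
    have hlen : ∀ w ∈ cur, ∀ v, lastPosP w (c ++ [x]) = some v → v ≤ (c.length : Int) := by
      intro w _ v hv
      have := (lastPosP_bounds w (c ++ [x]) v hv).2
      simp only [List.length_append, List.length_cons, List.length_nil] at this
      push_cast at this ⊢
      omega
    by_cases hx : PySem.Set.contains cur x = true
    · have hxl : x ∈ cur := (PySem.Set.contains_iff cur x).1 hx
      have hmax : foldMatchP (fun w => lastPosP w (c ++ [x])) cur (-1) = (c.length : Int) := by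
        apply le_antisymm
        · exact foldMatchP_le _ _ _ _ (by omega) hlen
        · exact le_foldMatchP_of_mem _ _ x (by rw [lastPosP_append, if_pos rfl]) cur (-1) hxl
      by_cases hm : PySem.Set.contains (chatBotInner cur c).2.2 x = true
      · have hxc : x ∈ c := ((ih3 x).1 hm).1
        rw [chatBotInner_append, if_pos hx, if_pos hm]
        refine ⟨?_, by simpa using hmax.symm, ?_⟩
        · show (chatBotInner cur c).1 = _
          rw [ih1, countP_append_singleton cur hnd c x, if_neg (fun h => h.2 hxc)]
          ring
        · intro y
          show PySem.Set.contains (chatBotInner cur c).2.2 y = true ↔ _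
          rw [ih3 y]
          simp only [List.mem_append, List.mem_singleton]
          constructor
          · exact fun ⟨h1, h2⟩ => ⟨Or.inl h1, h2⟩
          · rintro ⟨(h | rfl), h2⟩
            · exact ⟨h, h2⟩
            · exact ⟨hxc, h2⟩
      · have hxc : x ∉ c := fun h => hm ((ih3 x).2 ⟨h, hx⟩)
        rw [chatBotInner_append, if_pos hx, if_neg hm]
        refine ⟨?_, by simpa using hmax.symm, ?_⟩
        · show (chatBotInner cur c).1 + 1 = _
          rw [ih1, countP_append_singleton cur hnd c x, if_pos ⟨hxl, hxc⟩]
        · intro y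
          show PySem.Set.contains (PySem.Set.add (chatBotInner cur c).2.2 x) y = true ↔ _
          rw [PySem.Set.contains_iff, PySem.Set.mem_add]
          rw [← PySem.Set.contains_iff, ih3 y]
          simp only [List.mem_append, List.mem_singleton]
          constructor
          · rintro (⟨h1, h2⟩ | rfl)
            · exact ⟨Or.inl h1, h2⟩
            · exact ⟨Or.inr rfl, hx⟩
          · rintro ⟨(h | rfl), h2⟩
            · exact Or.inl ⟨h, h2⟩
            · exact Or.inr rfl
    · rw [chatBotInner_append, if_neg hx]
      have hne : ∀ w ∈ cur, w ≠ x := by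
        intro w hw rfl
        exact hx ((PySem.Set.contains_iff cur w).2 hw)
      refine ⟨?_, ?_, ?_⟩
      · rw [ih1]
        congr 1
        exact_mod_cast (List.countP_congr (fun w hw => by
          simp only [List.mem_append, List.mem_singleton, decide_eq_true_eq]
          exact ⟨fun h => h.resolve_right (hne w hw), Or.inl⟩)).symm
      · rw [ih2]
        exact (foldMatchP_congr _ _ _ _ (fun w hw => by
          rw [lastPosP_append, if_neg (fun h => hne w hw h.symm)])).symm
      · intro y
        rw [ih3 y]
        simp only [List.mem_append, List.mem_singleton]
        constructor
        · exact fun ⟨h1, h2⟩ => ⟨Or.inl h1, h2⟩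
        · rintro ⟨(h | rfl), h2⟩
          · exact ⟨h, h2⟩
          · exact absurd h2 hx

-- B's inverted index characterised ---------------------------------------------------------

theorem occLoopP_append (occ : PySem.Dict String (PySem.Dict Int Int)) (ci : Int)
    (convo : List String) (x : String) :
    occLoopP occ ci (convo ++ [x])
      = (occLoopP occ ci convo).insert x
          (((occLoopP occ ci convo).getD x PySem.Dict.empty).insert ci (convo.length : Int)) := by
  unfold occLoopP
  rw [PySem.List.enumerate_append, List.foldl_append]
  simp only [PySem.List.enumerate_cons, PySem.List.enumerate_nil, List.foldl_cons, List.foldl_nil,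
    zero_add]

theorem occLoopP_get (occ : PySem.Dict String (PySem.Dict Int Int)) (ci : Int)
    (convo : List String) (w : String) (ci' : Int) :
    ((occLoopP occ ci convo).getD w PySem.Dict.empty).get? ci'
      = ((if ci' = ci then lastPosP w convo else none).or
          ((occ.getD w PySem.Dict.empty).get? ci')) := by
  induction convo using List.reverseRecOn with
  | nil =>
    have : lastPosP w [] = none := rfl
    simp [occLoopP, PySem.List.enumerate_nil, this]
  | append_singleton convo x ih =>
    rw [occLoopP_append, PySem.Dict.getD_insert]
    by_cases hwx : w = x
    · subst hwx
      rw [if_pos rfl, PySem.Dict.get?_insert, lastPosP_append, if_pos rfl]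
      by_cases hci : ci' = ci
      · subst hci; simp
      · simp [hci, ih]
    · rw [if_neg hwx, ih, lastPosP_append, if_neg (fun (h : x = w) => hwx h.symm)]

theorem occLoopP_nodup (occ : PySem.Dict String (PySem.Dict Int Int)) (ci : Int)
    (convo : List String) (hnd : ∀ w, (occ.getD w PySem.Dict.empty).keys.Nodup) :
    ∀ w, ((occLoopP occ ci convo).getD w PySem.Dict.empty).keys.Nodup := by
  induction convo using List.reverseRecOn with
  | nil => exact hnd
  | append_singleton convo x ih =>
    intro w
    rw [occLoopP_append, PySem.Dict.getD_insert]
    by_cases hwx : w = x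
    · rw [if_pos hwx]
      exact PySem.Dict.nodup_keys_insert _ _ _ (ih x)
    · rw [if_neg hwx]
      exact ih w

theorem bOcc_append (convs : List (List String)) (c : List String) :
    bOcc (convs ++ [c]) = occLoopP (bOcc convs) (convs.length : Int) c := by
  unfold bOcc occLoopP
  rw [PySem.List.enumerate_append, List.foldl_append]
  simp only [PySem.List.enumerate_cons, PySem.List.enumerate_nil, List.foldl_cons, List.foldl_nil,
    zero_add]

theorem bOcc_nodup (convs : List (List String)) :
    ∀ w, ((bOcc convs).getD w PySem.Dict.empty).keys.Nodup := by
  induction convs using List.reverseRecOn with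
  | nil =>
    intro w
    simp [bOcc, PySem.List.enumerate_nil, PySem.Dict.getD_empty, PySem.Dict.keys_empty]
  | append_singleton convs c ih =>
    rw [bOcc_append]
    exact occLoopP_nodup _ _ _ ih

theorem bOcc_get (convs : List (List String)) (w : String) (ci : Int) :
    ((bOcc convs).getD w PySem.Dict.empty).get? ci = occSpecP convs w ci := by
  induction convs using List.reverseRecOn with
  | nil =>
    simp [bOcc, PySem.List.enumerate_nil, PySem.Dict.getD_empty, PySem.Dict.get?_empty, occSpecP]
  | append_singleton convs c ih =>
    rw [bOcc_append, occLoopP_get, ih]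
    unfold occSpecP
    by_cases h0 : 0 ≤ ci
    · by_cases he : ci = (convs.length : Int)
      · subst he
        rw [if_pos rfl, if_pos h0, if_pos h0]
        simp only [Int.toNat_natCast, List.getElem?_concat_length,
          List.getElem?_eq_none (le_refl convs.length), Option.bind_some, Option.bind_none,
          Option.or_none]
      · rw [if_neg he, Option.none_or, if_pos h0, if_pos h0]
        have hk : ci.toNat ≠ convs.length := by omega
        by_cases hlt : ci.toNat < convs.length
        · rw [List.getElem?_append_left hlt]
        · rw [List.getElem?_eq_none (by omega),
              List.getElem?_eq_none (by simp only [List.length_append]; simp; omega)]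
    · have : ¬ ci = (convs.length : Int) := by omega
      rw [if_neg this, Option.none_or, if_neg h0, if_neg h0]

theorem occSpecP_valid (convs : List (List String)) (w : String) (k : Nat) (hk : k < convs.length) :
    occSpecP convs w (k : Int) = lastPosP w convs[k] := by
  unfold occSpecP
  rw [if_pos (by positivity), Int.toNat_natCast, List.getElem?_eq_getElem hk, Option.bind_some]

-- B's accumulation loops characterised -----------------------------------------------------

theorem bTallies_eq (occ : PySem.Dict String (PySem.Dict Int Int)) (cur : PySem.Set String) :
    bTallies occ cur =
      (List.foldl (fun cd w => List.foldl bStepCounts cd (occ.getD w PySem.Dict.empty).items)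
        PySem.Dict.empty cur,
       List.foldl (fun ld w => List.foldl bStepLast ld (occ.getD w PySem.Dict.empty).items)
        PySem.Dict.empty cur) := by
  unfold bTallies
  have h : (fun (cl : PySem.Dict Int Int × PySem.Dict Int Int) (w : String) =>
      List.foldl (fun s q => (bStepCounts s.1 q, bStepLast s.2 q)) cl
        (occ.getD w PySem.Dict.empty).items)
    = fun cl w => (List.foldl bStepCounts cl.1 (occ.getD w PySem.Dict.empty).items,
                   List.foldl bStepLast cl.2 (occ.getD w PySem.Dict.empty).items) := by
    funext cl w
    obtain ⟨a, b⟩ := cl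
    exact PySem.List.foldl_prod_mk _ _ _ _ _
  rw [h]
  exact PySem.List.foldl_prod_mk
    (fun cd w => List.foldl bStepCounts cd (occ.getD w PySem.Dict.empty).items)
    (fun ld w => List.foldl bStepLast ld (occ.getD w PySem.Dict.empty).items)
    cur PySem.Dict.empty PySem.Dict.empty

theorem countsItems (d : PySem.Dict Int Int) (inner : PySem.Dict Int Int)
    (hnd : inner.keys.Nodup) (ci : Int) :
    (List.foldl bStepCounts d inner.items).getD ci 0
      = d.getD ci 0 + (if (inner.get? ci).isSome then 1 else 0) := by
  have hfold : List.foldl bStepCounts d inner.items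
      = List.foldl (fun c k => c.insert k (c.getD k 0 + 1)) d (inner.items.map (·.1)) := by
    rw [List.foldl_map]
    rfl
  have hkeys : inner.items.map (·.1) = inner.keys := rfl
  rw [hfold, hkeys, PySem.Dict.getD_foldl_insert_add_one]
  cases h : inner.get? ci with
  | none =>
    have : ci ∉ inner.keys := (PySem.Dict.get?_eq_none_iff_not_mem_keys inner ci).1 h
    rw [List.count_eq_zero_of_not_mem this]
    simp
  | some v =>
    have hmem : ci ∈ inner.keys := by
      by_contra hc
      rw [(PySem.Dict.get?_eq_none_iff_not_mem_keys inner ci).2 hc] at h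
      simp at h
    rw [List.count_eq_one_of_mem hnd hmem]
    simp

theorem countsFold (occ : PySem.Dict String (PySem.Dict Int Int))
    (hnd : ∀ w, (occ.getD w PySem.Dict.empty).keys.Nodup) (ws : List String)
    (d : PySem.Dict Int Int) (ci : Int) :
    (List.foldl (fun cd w => List.foldl bStepCounts cd (occ.getD w PySem.Dict.empty).items) d ws).getD ci 0
      = d.getD ci 0
        + (List.countP (fun w => ((occ.getD w PySem.Dict.empty).get? ci).isSome) ws : Int) := by
  induction ws generalizing d with
  | nil => simp
  | cons w ws ih =>
    simp only [List.foldl_cons, List.countP_cons]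
    rw [ih, countsItems _ _ (hnd w)]
    by_cases h : ((occ.getD w PySem.Dict.empty).get? ci).isSome = true
    · simp [h]; push_cast; ring
    · simp [h]

theorem lastItemsAux (l : List (Int × Int)) (d : PySem.Dict Int Int) (ci : Int) :
    (List.foldl bStepLast d l).getD ci (-1)
      = List.foldl (fun m v => max m v) (d.getD ci (-1))
          ((l.filter (fun q => decide (q.1 = ci))).map (·.2)) := by
  induction l generalizing d with
  | nil => rfl
  | cons q l ih =>
    simp only [List.foldl_cons, List.filter_cons]
    by_cases hq : q.1 = ci
    · simp only [hq, decide_true]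
      have hstep : (bStepLast d q).getD ci (-1) = max (d.getD ci (-1)) q.2 := by
        unfold bStepLast
        rw [hq]
        split_ifs with h
        · rw [PySem.Dict.getD_insert, if_pos rfl]
          exact (max_eq_right h.le).symm
        · exact (max_eq_left (by omega)).symm
      rw [ih, hstep]
      simp
    · simp only [hq, decide_false]
      have hstep : (bStepLast d q).getD ci (-1) = d.getD ci (-1) := by
        unfold bStepLast
        split_ifs with h
        · rw [PySem.Dict.getD_insert, if_neg (fun hc => hq hc.symm)]
        · rfl
      rw [ih, hstep]
      simp

theorem lastItems (d : PySem.Dict Int Int) (inner : PySem.Dict Int Int)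
    (hnd : inner.keys.Nodup) (ci : Int) :
    (List.foldl bStepLast d inner.items).getD ci (-1)
      = (match inner.get? ci with
         | some v => max (d.getD ci (-1)) v
         | none => d.getD ci (-1)) := by
  rw [lastItemsAux]
  have hitems : inner.items = inner.keys.map (fun k => (k, inner.getD k 0)) :=
    PySem.Dict.items_eq_map_keys inner hnd 0
  rw [hitems, List.filter_map]
  have hcomp : ((fun q : Int × Int => decide (q.1 = ci)) ∘ (fun k => (k, inner.getD k 0)))
      = fun k => decide (k = ci) := rfl
  rw [hcomp, List.filter_eq]
  cases h : inner.get? ci with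
  | none =>
    have : ci ∉ inner.keys := (PySem.Dict.get?_eq_none_iff_not_mem_keys inner ci).1 h
    rw [List.count_eq_zero_of_not_mem this]
    rfl
  | some v =>
    have hmem : ci ∈ inner.keys := by
      by_contra hc
      rw [(PySem.Dict.get?_eq_none_iff_not_mem_keys inner ci).2 hc] at h
      simp at h
    rw [List.count_eq_one_of_mem hnd hmem]
    have : inner.getD ci 0 = v := by
      rw [PySem.Dict.getD_eq_get?_getD, h]
      rfl
    simp [this]

theorem lastFold (occ : PySem.Dict String (PySem.Dict Int Int))
    (hnd : ∀ w, (occ.getD w PySem.Dict.empty).keys.Nodup) (ws : List String)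
    (d : PySem.Dict Int Int) (ci : Int) :
    (List.foldl (fun ld w => List.foldl bStepLast ld (occ.getD w PySem.Dict.empty).items) d ws).getD ci (-1)
      = foldMatchP (fun w => (occ.getD w PySem.Dict.empty).get? ci) ws (d.getD ci (-1)) := by
  induction ws generalizing d with
  | nil => rfl
  | cons w ws ih =>
    simp only [List.foldl_cons, foldMatchP]
    rw [ih]
    congr 1
    rw [lastItems _ _ (hnd w)]

-- the selection loops agree ----------------------------------------------------------------

theorem sel_loop (v : Int → Int) (rest : List (Int × Int)) : ∀ (j b : Int),
    (∀ p ∈ PySem.List.enumerate rest j, p.2.1 = v p.1) →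
    List.foldl (fun s p => if p.2.1 > s.1 then (p.2.1, p.1) else s) (v b, b)
      (PySem.List.enumerate rest j)
    = (v (List.foldl (fun b' i => if v i > v b' then i else b') b
            (PySem.List.pyRange j (j + rest.length) 1)),
       List.foldl (fun b' i => if v i > v b' then i else b') b
            (PySem.List.pyRange j (j + rest.length) 1)) := by
  induction rest with
  | nil =>
    intro j b _
    rw [PySem.List.enumerate_nil, PySem.List.pyRange_one_eq_nil (by simp)]
    rfl
  | cons r rest ih =>
    intro j b h
    rw [PySem.List.enumerate_cons, List.foldl_cons]
    have hrange : PySem.List.pyRange j (j + ((r :: rest).length : Int)) 1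
        = j :: PySem.List.pyRange (j + 1) ((j + 1) + (rest.length : Int)) 1 := by
      have h1 : j < j + ((r :: rest).length : Int) := by
        simp only [List.length_cons]
        push_cast
        omega
      rw [PySem.List.pyRange_one_cons h1]
      congr 1
      simp only [List.length_cons]
      push_cast
      ring_nf
    rw [hrange, List.foldl_cons]
    have hr : r.1 = v j := h (j, r) (List.mem_cons_self)
    have htail : ∀ p ∈ PySem.List.enumerate rest (j + 1), p.2.1 = v p.1 :=
      fun p hp => h p (List.mem_cons_of_mem _ hp)
    by_cases hc : r.1 > v b
    · rw [if_pos hc, if_pos (by rw [← hr]; exact hc), hr]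
      exact ih (j + 1) j htail
    · rw [if_neg hc, if_neg (by rw [← hr]; exact hc)]
      exact ih (j + 1) b htail

theorem sel_mem (v : Int → Int) (l : List Int) : ∀ (b : Int),
    List.foldl (fun b' i => if v i > v b' then i else b') b l = b
    ∨ List.foldl (fun b' i => if v i > v b' then i else b') b l ∈ l := by
  induction l with
  | nil => intro b; exact Or.inl rfl
  | cons i l ih =>
    intro b
    simp only [List.foldl_cons]
    by_cases hc : v i > v b
    · rw [if_pos hc]
      rcases ih i with h | h
      · exact Or.inr (by rw [h]; exact List.mem_cons_self)
      · exact Or.inr (List.mem_cons_of_mem _ h)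
    · rw [if_neg hc]
      rcases ih b with h | h
      · exact Or.inl h
      · exact Or.inr (List.mem_cons_of_mem _ h)

-- ===== VERDICT (by name: the statement is the Claim_ definition above) =====
theorem chatBot_spec : Claim_equal_chatBot := by
  intro conversations currentConversation _ hpre
  obtain ⟨c0, rest, rfl⟩ : ∃ c0 rest, conversations = c0 :: rest := by
    cases conversations with
    | nil => exact absurd rfl hpre
    | cons a l => exact ⟨a, l, rfl⟩
  unfold Spec_chatBot chatBot chatBot_alt
  simp only [PySem.List.foldl_append_singleton_eq_map, List.nil_append]
  have hnd : List.Nodup (PySem.Set.ofList currentConversation) :=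
    PySem.Set.nodup_ofList currentConversation
  -- pointwise: B's counts dict agrees with A's numMatches, B's last dict with largestMatchIndex
  have hcounts : ∀ (k : Nat), ∀ (hk : k < (c0 :: rest).length),
      (bTallies (bOcc (c0 :: rest)) (PySem.Set.ofList currentConversation)).1.getD (k : Int) 0
        = (chatBotInner (PySem.Set.ofList currentConversation) (c0 :: rest)[k]).1 := by
    intro k hk
    rw [bTallies_eq]
    dsimp only
    rw [countsFold _ (bOcc_nodup (c0 :: rest)) _ PySem.Dict.empty _, PySem.Dict.getD_empty,
      (chatBotInner_char _ hnd (c0 :: rest)[k]).1]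
    have hcp := List.countP_congr
      (l := PySem.Set.ofList currentConversation)
      (p := fun w => (((bOcc (c0 :: rest)).getD w PySem.Dict.empty).get? (k : Int)).isSome)
      (q := fun w => decide (w ∈ (c0 :: rest)[k]))
      (fun w _ => by
        dsimp only
        rw [bOcc_get, occSpecP_valid (c0 :: rest) w k hk]
        simp [lastPosP_isSome_iff])
    rw [hcp]
    omega
  have hlast : ∀ (k : Nat), ∀ (hk : k < (c0 :: rest).length),
      (bTallies (bOcc (c0 :: rest)) (PySem.Set.ofList currentConversation)).2.getD (k : Int) (-1)
        = (chatBotInner (PySem.Set.ofList currentConversation) (c0 :: rest)[k]).2.1 := by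
    intro k hk
    rw [bTallies_eq]
    dsimp only
    rw [lastFold _ (bOcc_nodup (c0 :: rest)) _ PySem.Dict.empty _, PySem.Dict.getD_empty,
      (chatBotInner_char _ hnd (c0 :: rest)[k]).2.1]
    exact foldMatchP_congr _ _ _ (-1)
      (fun w _ => by rw [bOcc_get, occSpecP_valid (c0 :: rest) w k hk])
  -- the two selection loops agree
  set f : List String → Int × Int :=
    fun convo => ((chatBotInner (PySem.Set.ofList currentConversation) convo).1,
                  (chatBotInner (PySem.Set.ofList currentConversation) convo).2.1) with hf
  set v : Int → Int :=
    fun i => (bTallies (bOcc (c0 :: rest)) (PySem.Set.ofList currentConversation)).1.getD i 0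
    with hv
  set bestB : Int := (PySem.List.pyRange 1 (((c0 :: rest).length : Nat) : Int) 1).foldl
    (fun b i => if v i > v b then i else b) 0 with hbest
  have hselA : chatBotSelectA ((c0 :: rest).map f) = (v bestB, bestB) := by
    unfold chatBotSelectA
    rw [List.map_cons, PySem.List.enumerate_cons, List.foldl_cons]
    have hfc0 : (f c0).1 = v 0 := by
      have h0 := hcounts 0 (by simp)
      simp only [List.getElem_cons_zero, Int.natCast_zero] at h0
      exact h0.symm
    have hpos : (f c0).1 > (-1 : Int) := by
      rw [hf]
      dsimp only
      rw [(chatBotInner_char _ hnd c0).1]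
      omega
    rw [if_pos hpos]
    dsimp only
    rw [zero_add]
    have htail : ∀ p ∈ PySem.List.enumerate (rest.map f) 1, p.2.1 = v p.1 := by
      intro p hp
      obtain ⟨k, hk, rfl⟩ := (PySem.List.mem_enumerate_iff _ _ _).1 hp
      have hk' : k < rest.length := by simpa using hk
      have hcast : (1 : Int) + (k : Int) = ((k + 1 : Nat) : Int) := by push_cast; ring
      have h1 := hcounts (k + 1) (by simpa using Nat.succ_lt_succ hk')
      simp only [List.getElem_cons_succ] at h1
      dsimp only
      rw [List.getElem_map, hcast]
      exact h1.symm
    rw [hfc0]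
    rw [sel_loop v (rest.map f) 1 0 htail]
    have hlen : (1 : Int) + ((rest.map f).length : Int) = (((c0 :: rest).length : Nat) : Int) := by
      simp only [List.length_map, List.length_cons]
      push_cast
      ring
    rw [hlen, ← hbest]
  rw [hselA]
  by_cases hz : v bestB = 0
  · rw [if_pos hz, if_pos hz]
  · rw [if_neg hz, if_neg hz]
    -- bestB is a valid index
    have hbnd : 0 ≤ bestB ∧ bestB < (((c0 :: rest).length : Nat) : Int) := by
      rcases sel_mem v (PySem.List.pyRange 1 (((c0 :: rest).length : Nat) : Int) 1) 0 with h | h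
      · rw [hbest, h]
        constructor
        · exact le_refl 0
        · simp only [List.length_cons]; push_cast; omega
      · rw [hbest] at *
        have := (PySem.List.mem_pyRange_one).1 h
        exact ⟨by omega, this.2⟩
    obtain ⟨hb0, hbl⟩ := hbnd
    have hkk : bestB.toNat < (c0 :: rest).length := by omega
    have hcast : ((bestB.toNat : Nat) : Int) = bestB := Int.toNat_of_nonneg hb0
    congr 2
    -- the largestMatchIndex A reads from matchInfo is B's last-dict entry
    have hmi : PySem.List.pyGet? ((c0 :: rest).map f) bestB = some (f (c0 :: rest)[bestB.toNat]) := by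
      rw [PySem.List.pyGet?_eq_some_getElem _ hb0 (by simpa using hbl), List.getElem_map]
    rw [hmi]
    have hl := hlast bestB.toNat hkk
    rw [hcast] at hl
    rw [hl, hf]
    simp
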